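-- pv_equiv track=rewrite | github.com/miliar/Code_Jam_Webscraper | solutions_python/Problem_181/1390.py | produce
-- ===== SOURCE A (Python) =====
-- def produce(word):
--     "given a word, produce the 'last word'"
--     string = word[0]
--     if len(word) > 1:
--         rest = word[1:]
--         for letter in rest:
--             if letter >= string[0]:
--                 string = letter + string
--             else:
--                 string = string + letter
--     return string
-- ===== SOURCE B (Python) =====
-- def produce(word):
--     "given a word, produce the 'last word'"
--     best = word[0]
--     pm = []                       # pm[i] = max(word[:i+1])
--     for c in word:
--         if c > best:
--             best = c
--         pm.append(best)
--     front = [c for c, m in zip(word, pm) if c == m]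
--     back = [c for c, m in zip(word, pm) if c != m]
--     return ''.join(sorted(front, reverse=True)) + ''.join(back)
-- ===== Notes on version B (the rewrite author's own statement) =====
-- stated objective: faster
-- what changed: B replaces A's stateful prepend/append string building (each letter compared to the string's current first character) with three staged passes: a prefix-maximum table, a partition of the word into letters that equal their prefix maximum and the rest, and a descending sort of the former group (the front part of the last word is exactly the prefix maxima in descending order) concatenated with the latter; this avoids A's repeated O(n) string copies.
-- outside the precondition, e.g. on produce(''): A raises IndexError, B raises IndexError
import Mathlib
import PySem

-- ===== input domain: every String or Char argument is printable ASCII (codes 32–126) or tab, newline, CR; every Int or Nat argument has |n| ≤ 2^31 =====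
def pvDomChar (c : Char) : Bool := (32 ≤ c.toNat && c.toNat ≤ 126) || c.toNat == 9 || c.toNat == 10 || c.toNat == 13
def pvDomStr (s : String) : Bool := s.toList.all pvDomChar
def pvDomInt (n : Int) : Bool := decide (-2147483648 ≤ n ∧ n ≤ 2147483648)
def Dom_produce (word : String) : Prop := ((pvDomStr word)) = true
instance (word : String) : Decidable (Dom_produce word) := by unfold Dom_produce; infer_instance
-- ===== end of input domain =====

-- B builds a prefix-maximum table, partitions the word into letters that equal their prefix maximum and the rest,
-- and emits the front letters by a descending sort, instead of A's stateful prepend/append loop.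


-- ===== PORT A =====
-- A's loop step: compare the letter with the current first character, prepend or append.
def stepA (s : List Char) (c : Char) : List Char :=
  match s with
  | [] => [c]            -- unreachable: the accumulator is always nonempty
  | h :: _ => if h ≤ c then c :: s else s ++ [c]

def produce (word : String) : String :=
  match word.toList with
  | [] => ""             -- Python raises IndexError here; excluded by Pre_produce
  | w0 :: rest => String.ofList (rest.foldl stepA [w0])

-- ===== PORT B =====
-- B's table-building step: best = max(best, c); pm.append(best)
def stepB (p : Char × List Char) (c : Char) : Char × List Char :=
  let b := if p.1 < c then c else p.1
  (b, p.2 ++ [b])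

def produce_alt (word : String) : String :=
  match word.toList with
  | [] => ""             -- Python raises IndexError at word[0] here; excluded by Pre_produce
  | w0 :: rest =>
    let cs := w0 :: rest
    let pm := (cs.foldl stepB (w0, [])).2                                     -- pm[i] = max(word[:i+1])
    let front := ((cs.zip pm).filter (fun p => p.1 == p.2)).map Prod.fst      -- [c for c, m in zip(word, pm) if c == m]
    let back := ((cs.zip pm).filter (fun p => !(p.1 == p.2))).map Prod.fst    -- [c for c, m in zip(word, pm) if c != m]
    String.ofList (PySem.List.sorted front (fun c => c) true ++ back)         -- ''.join(sorted(front, reverse=True)) + ''.join(back)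

-- ===== PRECONDITION & SPEC =====
-- Pre_ excludes only the empty string, on which both Pythons raise IndexError at word[0].
def Pre_produce (word : String) : Prop := word ≠ ""
instance (word : String) : Decidable (Pre_produce word) := by unfold Pre_produce; infer_instance
def pvWitness_produce : String := "cab"

def Spec_produce (word : String) (out : String) : Prop := out = produce_alt word
instance (word : String) (out : String) : Decidable (Spec_produce word out) := by unfold Spec_produce; infer_instance

-- ===== CLAIM (what is proved, stated in full; the proofs are below) =====
def Claim_equal_produce : Prop := ∀ (word : String), Dom_produce word → Pre_produce word → Spec_produce word (produce word)

-- ===== LEMMAS AND PROOFS =====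

-- abbreviations for B's intermediate lists, used only by the proofs (definitionally equal to the port's lets)
def pmL (h : Char) (t : List Char) : List Char := ((h :: t).foldl stepB (h, [])).2
def bestL (h : Char) (t : List Char) : Char := ((h :: t).foldl stepB (h, [])).1
def frontL (h : Char) (t : List Char) : List Char :=
  (((h :: t).zip (pmL h t)).filter (fun p => p.1 == p.2)).map Prod.fst
def backL (h : Char) (t : List Char) : List Char :=
  (((h :: t).zip (pmL h t)).filter (fun p => !(p.1 == p.2))).map Prod.fst

lemma pm_snoc (h : Char) (l : List Char) (c : Char) :
    ((l ++ [c]).foldl stepB (h, [])).2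
      = (l.foldl stepB (h, [])).2
        ++ [if (l.foldl stepB (h, [])).1 < c then c else (l.foldl stepB (h, [])).1] ∧
    ((l ++ [c]).foldl stepB (h, [])).1
      = (if (l.foldl stepB (h, [])).1 < c then c else (l.foldl stepB (h, [])).1) := by
  rw [List.foldl_append]
  cases hf : l.foldl stepB (h, []) with
  | mk b pm =>
    simp [stepB]

lemma pm_length (l : List Char) : ∀ (b0 : Char) (acc : List Char),
    (l.foldl stepB (b0, acc)).2.length = acc.length + l.length := by
  induction l with
  | nil => intro b0 acc; simp
  | cons c l ih =>
    intro b0 acc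
    simp only [List.foldl_cons, stepB]
    rw [ih]
    simp; omega

lemma pmL_len (h : Char) (t : List Char) : (pmL h t).length = t.length + 1 := by
  unfold pmL; rw [pm_length]; simp

lemma pm_snoc' (h : Char) (t : List Char) (c : Char) :
    pmL h (t ++ [c]) = pmL h t ++ [if bestL h t < c then c else bestL h t] ∧
    bestL h (t ++ [c]) = (if bestL h t < c then c else bestL h t) := by
  unfold pmL bestL
  have := pm_snoc h (h :: t) c
  simpa using this

lemma front_back_snoc (h : Char) (t : List Char) (c nb : Char)
    (hpm : pmL h (t ++ [c]) = pmL h t ++ [nb]) :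
    frontL h (t ++ [c]) = frontL h t ++ (if c == nb then [c] else []) ∧
    backL h (t ++ [c]) = backL h t ++ (if c == nb then [] else [c]) := by
  unfold frontL backL
  rw [hpm]
  have hz : (h :: (t ++ [c])).zip (pmL h t ++ [nb])
      = (h :: t).zip (pmL h t) ++ [(c, nb)] := by
    have : h :: (t ++ [c]) = (h :: t) ++ [c] := by simp
    rw [this, List.zip_append (by rw [pmL_len]; simp)]
    rfl
  rw [hz]
  cases hcb : (c == nb) <;> simp [hcb]

/-- Main loop invariant, by snoc induction on the tail: A's accumulator is B's
`front.reverse ++ back`, `front` is ≤-sorted, its last element is the running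
maximum, and B's `best` is that same maximum. -/
lemma main_inv (h : Char) (t : List Char) :
    ∃ m,
      (frontL h t).getLast? = some m ∧
      (∀ x ∈ h :: t, x ≤ m) ∧ m ∈ h :: t ∧
      (∀ x ∈ frontL h t, x ≤ m) ∧
      (frontL h t).Pairwise (· ≤ ·) ∧
      t.foldl stepA [h] = (frontL h t).reverse ++ backL h t ∧
      bestL h t = m := by
  induction t using List.reverseRecOn with
  | nil =>
    refine ⟨h, ?_, ?_, ?_, ?_, ?_, ?_, ?_⟩ <;>
      simp [frontL, backL, pmL, bestL, stepB]
  | append_singleton t' c ih =>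
    obtain ⟨m, hlast, hmaxAll, hmemm, hfle, hpw, heq, hbest⟩ := ih
    obtain ⟨hpm, hbest'⟩ := pm_snoc' h t' c
    rw [hbest] at hpm hbest'
    have hrevhead : (frontL h t').reverse.head? = some m := by
      rw [List.head?_reverse]; exact hlast
    obtain ⟨s, hs⟩ : ∃ s, (frontL h t').reverse = m :: s := by
      cases hsr : (frontL h t').reverse with
      | nil => rw [hsr] at hrevhead; simp at hrevhead
      | cons a s => rw [hsr] at hrevhead; simp at hrevhead; exact ⟨s, by rw [hrevhead]⟩
    have hfold : (t' ++ [c]).foldl stepA [h] = stepA ((frontL h t').reverse ++ backL h t') c := by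
      rw [List.foldl_append, heq]; rfl
    by_cases hc : m ≤ c
    · -- c is a new prefix maximum: pm gets c, and c's flag is true
      have hnb : (if m < c then c else m) = c := by
        rcases lt_or_eq_of_le hc with hlt | heqc
        · rw [if_pos hlt]
        · rw [heqc]; simp
      rw [hnb] at hpm hbest'
      obtain ⟨hf, hb⟩ := front_back_snoc h t' c c hpm
      simp only [beq_self_eq_true, if_true] at hf hb
      refine ⟨c, ?_, ?_, ?_, ?_, ?_, ?_, ?_⟩
      · rw [hf]; simp
      · intro x hx
        have hx' : x ∈ (h :: t') ++ [c] := by simpa using hx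
        rcases List.mem_append.mp hx' with hin | hin
        · exact le_trans (hmaxAll x hin) hc
        · simp at hin; exact le_of_eq hin
      · simp
      · intro x hx
        rw [hf] at hx
        rcases List.mem_append.mp hx with hin | hin
        · exact le_trans (hfle x hin) hc
        · simp at hin; exact le_of_eq hin
      · rw [hf]
        refine List.pairwise_append.mpr ⟨hpw, by simp, ?_⟩
        intro a ha b hb'
        simp at hb'
        subst hb'
        exact le_trans (hfle a ha) hc
      · rw [hfold, hb, hf, hs]
        simp [stepA, hc, List.reverse_append, hs]
      · exact hbest'
    · -- c is not a new maximum: pm keeps m, and c's flag is false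
      have hnb : (if m < c then c else m) = m := by
        rw [if_neg (fun hlt => hc (le_of_lt hlt))]
      rw [hnb] at hpm hbest'
      obtain ⟨hf, hb⟩ := front_back_snoc h t' c m hpm
      have hcm : (c == m) = false := by
        simp only [beq_eq_false_iff_ne, ne_eq]
        intro hcm; exact hc (le_of_eq hcm.symm)
      rw [hcm] at hf hb
      simp only [if_false, Bool.false_eq_true] at hf hb
      refine ⟨m, ?_, ?_, ?_, ?_, ?_, ?_, ?_⟩
      · rw [hf]; simpa using hlast
      · intro x hx
        have hx' : x ∈ (h :: t') ++ [c] := by simpa using hx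
        rcases List.mem_append.mp hx' with hin | hin
        · exact hmaxAll x hin
        · simp at hin; subst hin; exact le_of_lt (lt_of_not_ge hc)
      · have : m ∈ (h :: t') ++ [c] := List.mem_append.mpr (Or.inl hmemm)
        simpa using this
      · intro x hx; rw [hf] at hx; simp at hx; exact hfle x (by simpa using hx)
      · rw [hf]; simpa using hpw
      · rw [hfold, hb, hf, hs]
        simp [stepA, hc, hs]
      · exact hbest'

/-- A ≤-sorted Char list reversed is its descending Python sort. -/
lemma sorted_rev_eq_reverse (f : List Char) (hpw : f.Pairwise (· ≤ ·)) :
    PySem.List.sorted f (fun c => c) true = f.reverse := by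
  apply List.Perm.eq_of_pairwise (le := fun a b : Char => b ≤ a)
  · intro a b _ _ h1 h2; exact le_antisymm h2 h1
  · exact PySem.List.sorted_pairwise_rev f (fun c => c)
  · exact List.pairwise_reverse.mpr hpw
  · exact (PySem.List.sorted_perm f _ _).trans (List.reverse_perm f).symm

-- ===== VERDICT (by name: the statement is the Claim_ definition above) =====
theorem produce_spec : Claim_equal_produce := by
  intro word _ hpre
  unfold Spec_produce produce produce_alt
  cases hw : word.toList with
  | nil => exact absurd (String.toList_eq_nil_iff.mp hw) hpre
  | cons w0 rest =>
    obtain ⟨m, _, _, _, _, hpw, heq, _⟩ := main_inv w0 rest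
    simp only []
    rw [heq]
    rw [show (((w0 :: rest).foldl stepB (w0, [])).2) = pmL w0 rest from rfl]
    rw [show (((w0 :: rest).zip (pmL w0 rest)).filter (fun p => p.1 == p.2)).map Prod.fst = frontL w0 rest from rfl]
    rw [show (((w0 :: rest).zip (pmL w0 rest)).filter (fun p => !(p.1 == p.2))).map Prod.fst = backL w0 rest from rfl]
    rw [sorted_rev_eq_reverse _ hpw]
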